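-- pv_equiv track=rewrite | github.com/MrBrantCode/unitest_baseline | mut_generate/mist_train_taco/taco_2224/solution.py | calculate_minimal_penalty
-- ===== SOURCE A (Python) =====
-- def calculate_minimal_penalty(problem_times):
--     # Sort the problem times in ascending order
--     sorted_times = sorted(problem_times)
--
--     # Initialize variables for penalty calculation
--     total_penalty = 0
--     cumulative_time = 0
--
--     # Calculate the minimal penalty
--     for time in sorted_times:
--         cumulative_time += time
--         total_penalty += cumulative_time
--
--     return total_penalty
-- ===== SOURCE B (Python) =====
-- def calculate_minimal_penalty(problem_times):
--     # No sorting: the minimal total penalty equals the sum of all times plus,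
--     # for every unordered pair, the smaller of the two times (the smaller job
--     # of any pair is always scheduled first in the optimal order, so it is
--     # counted once more per partner).
--     total = 0
--     rest = list(problem_times)
--     while rest:
--         a = rest.pop(0)
--         total += a
--         for b in rest:
--             total += a if a <= b else b
--     return total
-- ===== Notes on version B (the rewrite author's own statement) =====
-- stated objective: alternative
-- what changed: Eliminates sorting entirely: computes the answer as sum(times) plus the pairwise sum of min(a,b) over all unordered pairs, a quadratic pairwise pass instead of sort-then-prefix-sum.
import Mathlib
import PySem

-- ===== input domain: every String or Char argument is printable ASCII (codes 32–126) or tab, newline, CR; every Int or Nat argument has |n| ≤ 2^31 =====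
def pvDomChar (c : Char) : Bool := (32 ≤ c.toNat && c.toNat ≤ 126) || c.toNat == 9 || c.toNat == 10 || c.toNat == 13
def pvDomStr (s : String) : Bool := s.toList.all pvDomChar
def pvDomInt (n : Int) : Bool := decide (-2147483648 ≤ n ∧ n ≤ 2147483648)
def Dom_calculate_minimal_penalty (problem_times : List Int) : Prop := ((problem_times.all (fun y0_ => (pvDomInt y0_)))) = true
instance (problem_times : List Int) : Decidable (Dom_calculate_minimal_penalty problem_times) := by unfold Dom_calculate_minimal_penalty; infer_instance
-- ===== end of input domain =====

-- B replaces sort-then-prefix-sums with a sort-free pairwise pass: answer = sum(times) + Σ min over all unordered pairs (alternative algorithm, not faster).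


-- ===== PORT A =====
-- A: sort ascending, then one pass keeping a running cumulative time added into the penalty.
def calculate_minimal_penalty (problem_times : List Int) : Int :=
  let sorted_times := PySem.List.sorted problem_times id false
  let r := sorted_times.foldl
    (fun (st : Int × Int) time => (st.1 + (st.2 + time), st.2 + time)) (0, 0)
  r.1

-- ===== PORT B =====
-- B: no sorting; while rest nonempty: pop the front element a, add a, then add min(a, b) for every remaining b.
def pvPenLoop (total : Int) : List Int → Int
  | [] => total
  | a :: rest =>
      pvPenLoop (rest.foldl (fun acc b => acc + (if a ≤ b then a else b)) (total + a)) rest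

def calculate_minimal_penalty_alt (problem_times : List Int) : Int :=
  pvPenLoop 0 problem_times

-- ===== PRECONDITION & SPEC =====
def Spec_calculate_minimal_penalty (problem_times : List Int) (out : Int) : Prop := out = calculate_minimal_penalty_alt problem_times
instance (problem_times : List Int) (out : Int) : Decidable (Spec_calculate_minimal_penalty problem_times out) := by unfold Spec_calculate_minimal_penalty; infer_instance

-- ===== CLAIM (what is proved, stated in full; the proofs are below) =====
def Claim_equal_calculate_minimal_penalty : Prop := ∀ (problem_times : List Int), Dom_calculate_minimal_penalty problem_times → Spec_calculate_minimal_penalty problem_times (calculate_minimal_penalty problem_times)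

-- ===== LEMMAS AND PROOFS =====

-- weighted sum: head of a k-element list has weight k (characterises A's fold)
def pvW : List Int → Int
  | [] => 0
  | t :: r => t * (r.length + 1) + pvW r

-- sum of min(a, b) over the elements b of a list
def pvPM (a : Int) (l : List Int) : Int :=
  (l.map (fun b => if a ≤ b then a else b)).sum

-- sum over unordered pairs of the smaller element
def pvPairs : List Int → Int
  | [] => 0
  | a :: r => pvPM a r + pvPairs r

lemma pvA_fold (l : List Int) (p c : Int) :
    (l.foldl (fun (st : Int × Int) time => (st.1 + (st.2 + time), st.2 + time)) (p, c)).1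
      = p + c * l.length + pvW l := by
  induction l generalizing p c with
  | nil => simp [pvW]
  | cons t r ih =>
    simp only [List.foldl_cons, pvW, List.length_cons]
    rw [ih]
    push_cast
    ring

lemma pvPM_fold (a : Int) (l : List Int) (init : Int) :
    l.foldl (fun acc b => acc + (if a ≤ b then a else b)) init = init + pvPM a l := by
  induction l generalizing init with
  | nil => simp [pvPM]
  | cons b r ih => simp [List.foldl_cons, ih, pvPM]; ring

lemma pvPenLoop_eq (l : List Int) (t : Int) :
    pvPenLoop t l = t + l.sum + pvPairs l := by
  induction l generalizing t with
  | nil => simp [pvPenLoop, pvPairs]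
  | cons a r ih =>
    simp only [pvPenLoop, pvPM_fold, pvPairs, List.sum_cons]
    rw [ih]; ring

lemma pvPM_perm (a : Int) {l l' : List Int} (h : l.Perm l') : pvPM a l = pvPM a l' := by
  unfold pvPM
  exact List.Perm.sum_eq (h.map _)

lemma pvPairs_perm {l l' : List Int} (h : l.Perm l') : pvPairs l = pvPairs l' := by
  induction h with
  | nil => rfl
  | cons a h ih => simp [pvPairs, ih, pvPM_perm a h]
  | swap a b l =>
    simp only [pvPairs, pvPM, List.map_cons, List.sum_cons]
    have : (if b ≤ a then b else a) = (if a ≤ b then a else b) := by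
      split_ifs <;> omega
    rw [this]; ring
  | trans _ _ ih1 ih2 => exact ih1.trans ih2

lemma pvPM_of_le (a : Int) (l : List Int) (h : ∀ b ∈ l, a ≤ b) :
    pvPM a l = a * l.length := by
  unfold pvPM
  induction l with
  | nil => simp
  | cons b s ihs =>
    simp only [List.map_cons, List.sum_cons, if_pos (h b (by simp)), List.length_cons]
    rw [ihs (fun y hy => h y (by simp [hy]))]
    push_cast; ring

-- on an ascending list, the prefix-sum penalty equals sum + pairwise mins
lemma pvW_sorted (l : List Int) (h : l.Pairwise (· ≤ ·)) :
    pvW l = l.sum + pvPairs l := by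
  induction l with
  | nil => rfl
  | cons a r ih =>
    rcases List.pairwise_cons.mp h with ⟨ha, hr⟩
    have hpm : pvPM a r = a * r.length := pvPM_of_le a r ha
    simp only [pvW, pvPairs, List.sum_cons, ih hr, hpm]
    ring

-- ===== VERDICT (by name: the statement is the Claim_ definition above) =====
theorem calculate_minimal_penalty_spec : Claim_equal_calculate_minimal_penalty := by
  intro problem_times _
  unfold Spec_calculate_minimal_penalty calculate_minimal_penalty calculate_minimal_penalty_alt
  have hperm : (PySem.List.sorted problem_times id false).Perm problem_times :=
    PySem.List.sorted_perm problem_times id false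
  rw [pvA_fold, pvPenLoop_eq,
      pvW_sorted _ (by simpa using PySem.List.sorted_pairwise (xs := problem_times) (key := id)),
      hperm.sum_eq, pvPairs_perm hperm]
  simp
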